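-- pv_equiv track=rewrite | github.com/amajal/Aoc2017 | App24.py | max_length_bridge
-- ===== SOURCE A (Python) =====
-- def sum_bridge(bridge):
--     sum = 0
--     for component in bridge:
--         sum += int(component[0]) + int(component[1])
--
--     return sum
--
-- def max_length_bridge(bridges):
--     max_length = 0
--     max_sum = 0
--     for bridge in bridges:
--         bridge_length = len(bridge)
--
--         if bridge_length > max_length:
--             max_sum = 0
--             max_length = bridge_length
--
--         if bridge_length == max_length:
--             sum = sum_bridge(bridge)
--             if sum > max_sum:
--                 max_sum = sum
--
--     return max_sum
-- ===== SOURCE B (Python) =====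
-- def max_length_bridge(bridges):
--     max_length = max((len(b) for b in bridges), default=0)
--     return max([0] + [sum(int(a) + int(b) for a, b in bridge)
--                       for bridge in bridges if len(bridge) == max_length])
-- ===== Notes on version B (the rewrite author's own statement) =====
-- stated objective: simpler
-- what changed: Replaces the single stateful loop (running max-length with max-sum resets) by two stateless reductions: first the maximum bridge length, then the max component-sum over bridges of that length, seeded with 0 to keep the 0 floor.
import Mathlib
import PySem

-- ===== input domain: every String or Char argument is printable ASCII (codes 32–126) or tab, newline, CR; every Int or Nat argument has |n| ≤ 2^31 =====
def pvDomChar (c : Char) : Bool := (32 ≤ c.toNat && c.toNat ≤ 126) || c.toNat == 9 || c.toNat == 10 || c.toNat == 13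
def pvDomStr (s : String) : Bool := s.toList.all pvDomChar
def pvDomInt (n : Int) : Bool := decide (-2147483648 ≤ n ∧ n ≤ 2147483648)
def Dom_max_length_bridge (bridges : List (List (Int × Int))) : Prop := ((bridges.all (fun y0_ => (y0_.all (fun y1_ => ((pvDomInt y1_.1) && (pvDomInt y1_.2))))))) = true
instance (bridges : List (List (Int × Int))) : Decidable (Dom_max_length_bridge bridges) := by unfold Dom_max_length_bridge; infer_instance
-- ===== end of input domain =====

-- B replaces A's single stateful loop (running max length with max-sum resets) by two
-- stateless reductions: the max length first, then the max sum over bridges of that length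
-- (seeded with 0, preserving A's 0 floor). Same cost; objective: simpler.

-- ===== PORT A =====
-- A's helper sum_bridge (int() on an int is the identity)
def sum_bridge (bridge : List (Int × Int)) : Int :=
  bridge.foldl (fun s component => s + (component.1 + component.2)) 0

def max_length_bridge (bridges : List (List (Int × Int))) : Int :=
  (bridges.foldl (fun (st : Int × Int) bridge =>
      let bridge_length : Int := bridge.length
      let st := if bridge_length > st.1 then (bridge_length, 0) else st
      if bridge_length == st.1 then
        let s := sum_bridge bridge
        if s > st.2 then (st.1, s) else st
      else st) ((0 : Int), (0 : Int))).2

-- ===== PORT B =====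
-- B's inline 'sum(int(a) + int(b) for a, b in bridge)'
def bsum (bridge : List (Int × Int)) : Int :=
  bridge.foldl (fun s c => s + (c.1 + c.2)) 0

def max_length_bridge_alt (bridges : List (List (Int × Int))) : Int :=
  let max_length : Int :=
    (PySem.List.max? (bridges.map (fun b => (b.length : Int))) (fun x => x)).getD 0
  (PySem.List.max?
      (0 :: (bridges.filter (fun b => (b.length : Int) == max_length)).map bsum)
      (fun x => x)).getD 0

-- ===== PRECONDITION & SPEC =====
def Spec_max_length_bridge (bridges : List (List (Int × Int))) (out : Int) : Prop := out = max_length_bridge_alt bridges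
instance (bridges : List (List (Int × Int))) (out : Int) : Decidable (Spec_max_length_bridge bridges out) := by unfold Spec_max_length_bridge; infer_instance

-- ===== CLAIM (what is proved, stated in full; the proofs are below) =====
def Claim_equal_max_length_bridge : Prop := ∀ (bridges : List (List (Int × Int))), Dom_max_length_bridge bridges → Spec_max_length_bridge bridges (max_length_bridge bridges)

-- ===== LEMMAS AND PROOFS =====

-- canonical forms used by the proof
def pvML (l : List (List (Int × Int))) : Int :=
  l.foldl (fun m b => max m (b.length : Int)) 0

def pvBS (l : List (List (Int × Int))) (m : Int) : Int :=
  l.foldl (fun acc b => if ((b.length : Int) == m) then max acc (bsum b) else acc) 0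

theorem le_foldl_max_init (l : List (List (Int × Int))) (e : Int) :
    e ≤ l.foldl (fun m b => max m (b.length : Int)) e := by
  induction l generalizing e with
  | nil => simp
  | cons a t ih => exact le_trans (le_max_left _ _) (ih (max e (a.length : Int)))

theorem len_le_foldl_max (l : List (List (Int × Int))) (e : Int) :
    ∀ b ∈ l, (b.length : Int) ≤ l.foldl (fun m b => max m (b.length : Int)) e := by
  induction l generalizing e with
  | nil => intro b hb; simp at hb
  | cons a t ih =>
    intro b hb
    rcases List.mem_cons.mp hb with h | h
    · subst h
      exact le_trans (le_max_right e _) (le_foldl_max_init t _)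
    · exact ih _ b h

theorem pvBS_eq_zero (l : List (List (Int × Int))) (m : Int)
    (h : ∀ b ∈ l, (b.length : Int) ≠ m) : pvBS l m = 0 := by
  induction l with
  | nil => rfl
  | cons b t ih =>
    unfold pvBS at *
    simp only [List.foldl_cons]
    have hb : ((b.length : Int) == m) = false := by
      simp [h b (List.mem_cons_self)]
    rw [hb, if_neg Bool.false_ne_true]
    exact ih (fun x hx => h x (List.mem_cons_of_mem _ hx))

theorem pvBS_append (l : List (List (Int × Int))) (b : List (Int × Int)) (m : Int) :
    pvBS (l ++ [b]) m =
      if ((b.length : Int) == m) then max (pvBS l m) (bsum b) else pvBS l m := by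
  unfold pvBS; simp

theorem pvML_append (l : List (List (Int × Int))) (b : List (Int × Int)) :
    pvML (l ++ [b]) = max (pvML l) (b.length : Int) := by
  unfold pvML; simp

theorem afold_eq (l : List (List (Int × Int))) :
    l.foldl (fun (st : Int × Int) bridge =>
      let bridge_length : Int := bridge.length
      let st := if bridge_length > st.1 then (bridge_length, 0) else st
      if bridge_length == st.1 then
        let s := sum_bridge bridge
        if s > st.2 then (st.1, s) else st
      else st) ((0 : Int), (0 : Int)) = (pvML l, pvBS l (pvML l)) := by
  induction l using List.reverseRecOn with
  | nil => rfl
  | append_singleton t b ih =>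
    rw [List.foldl_append, ih, List.foldl_cons, List.foldl_nil, pvML_append, pvBS_append]
    have hsum : sum_bridge b = bsum b := rfl
    have hz : pvML t < (b.length : Int) → pvBS t (b.length : Int) = 0 := by
      intro hgt
      apply pvBS_eq_zero
      intro x hx
      have := len_le_foldl_max t 0 x hx
      unfold pvML at hgt
      omega
    clear ih
    by_cases hgt : pvML t < (b.length : Int)
    · have hm : max (pvML t) (b.length : Int) = (b.length : Int) := max_eq_right hgt.le
      by_cases hs : (0 : Int) < bsum b
      · simp [hgt, hs, hm, hz hgt, hsum, max_eq_right hs.le]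
      · simp [hgt, hs, hm, hz hgt, hsum, max_eq_left (not_lt.mp hs)]
    · have hle : (b.length : Int) ≤ pvML t := not_lt.mp hgt
      have hm : max (pvML t) (b.length : Int) = pvML t := max_eq_left hle
      by_cases heq : (b.length : Int) = pvML t
      · by_cases hs : pvBS t (pvML t) < bsum b
        · simp [heq, hsum, hs, max_eq_right hs.le]
        · simp [heq, hsum, hs, max_eq_left (not_lt.mp hs)]
      · simp [hgt, heq, hm]

theorem alt_eq (l : List (List (Int × Int))) :
    max_length_bridge_alt l = pvBS l (pvML l) := by
  have hml : (PySem.List.max? (l.map (fun b => (b.length : Int))) (fun x => x)).getD 0 = pvML l := by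
    cases l with
    | nil => rfl
    | cons b t =>
      rw [List.map_cons, PySem.List.max?_id_cons]
      unfold pvML
      simp only [Option.getD_some, List.foldl_cons, List.foldl_map]
      rw [max_eq_right (by positivity : (0 : Int) ≤ (b.length : Int))]
  unfold max_length_bridge_alt
  rw [hml]
  show (PySem.List.max?
      (0 :: (l.filter (fun b => (b.length : Int) == pvML l)).map bsum)
      (fun x => x)).getD 0 = pvBS l (pvML l)
  rw [PySem.List.max?_id_cons]
  simp only [Option.getD_some, List.foldl_map]
  rw [← PySem.List.foldl_if_eq_foldl_filter]
  rfl

-- ===== VERDICT (by name: the statement is the Claim_ definition above) =====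
theorem max_length_bridge_spec : Claim_equal_max_length_bridge := by
  intro bridges _
  unfold Spec_max_length_bridge max_length_bridge
  rw [afold_eq, alt_eq]
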